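-- pv_equiv track=rewrite | github.com/UrsaMiner/fnaf-game-py | fnafpy/fnafpy.py | powerBar
-- ===== SOURCE A (Python) =====
-- def powerBar(power): # return power bar in squares (1 square represents 20% (rounded))
--     temp_power = power - 10
--     no_squares = temp_power // 20
--     squares = ""
--     for i in range(5):
--         if len(squares) <= no_squares:
--             squares += "■"
--         else:
--             squares += "□"
--     return squares
-- ===== SOURCE B (Python) =====
-- def powerBar(power):
--     no_squares = (power - 10) // 20
--     filled = max(0, min(5, no_squares + 1))
--     return "■" * filled + "□" * (5 - filled)
-- ===== Notes on version B (the rewrite author's own statement) =====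
-- stated objective: simpler
-- what changed: Replaces the five-iteration character-appending loop with a closed-form clamped fill count and string replication.
import Mathlib
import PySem

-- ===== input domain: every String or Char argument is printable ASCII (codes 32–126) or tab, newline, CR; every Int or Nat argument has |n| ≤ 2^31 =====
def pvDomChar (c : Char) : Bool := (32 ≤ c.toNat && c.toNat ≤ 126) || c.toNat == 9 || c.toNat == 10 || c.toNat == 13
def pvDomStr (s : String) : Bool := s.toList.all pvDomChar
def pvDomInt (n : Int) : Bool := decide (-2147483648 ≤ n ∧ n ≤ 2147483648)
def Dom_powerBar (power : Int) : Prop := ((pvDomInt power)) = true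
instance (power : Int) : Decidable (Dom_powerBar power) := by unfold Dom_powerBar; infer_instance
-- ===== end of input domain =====

-- B replaces A's five-step character-appending loop by a closed-form clamped fill count
-- and string replication (objective: simpler).

-- ===== PORT A =====
def powerBar (power : Int) : String :=
  let temp_power := power - 10
  let no_squares := PySem.Int.floordiv temp_power 20
  (PySem.List.pyRange 0 5 1).foldl
    (fun squares _ =>
      if PySem.Str.len squares ≤ no_squares then squares ++ "■" else squares ++ "□") ""

-- ===== PORT B =====
def powerBar_alt (power : Int) : String :=
  let no_squares := PySem.Int.floordiv (power - 10) 20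
  let filled : Int := max 0 (min 5 (no_squares + 1))
  String.ofList (List.replicate filled.toNat '■') ++
    String.ofList (List.replicate (5 - filled).toNat '□')

-- ===== PRECONDITION & SPEC =====
def Spec_powerBar (power : Int) (out : String) : Prop := out = powerBar_alt power
instance (power : Int) (out : String) : Decidable (Spec_powerBar power out) := by unfold Spec_powerBar; infer_instance

-- ===== CLAIM (what is proved, stated in full; the proofs are below) =====
def Claim_equal_powerBar : Prop := ∀ (power : Int), Dom_powerBar power → Spec_powerBar power (powerBar power)

-- ===== LEMMAS AND PROOFS =====

-- A's loop fills square i exactly when i ≤ no_squares, so the result is the clamped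
-- fill count followed by empty squares.
theorem bar_key (ns : Int) :
    (PySem.List.pyRange 0 5 1).foldl
      (fun s _ => if PySem.Str.len s ≤ ns then s ++ "■" else s ++ "□") "" =
    String.ofList (List.replicate (max 0 (min 5 (ns + 1))).toNat '■') ++
      String.ofList (List.replicate (5 - max 0 (min 5 (ns + 1))).toNat '□') := by
  have hr : PySem.List.pyRange 0 5 1 = [0, 1, 2, 3, 4] := by decide
  rw [hr]
  simp only [List.foldl]
  by_cases h4 : 4 ≤ ns
  · rw [if_pos (show PySem.Str.len "" ≤ ns by have e : PySem.Str.len "" = 0 := (by decide); omega)]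
    rw [if_pos (show PySem.Str.len ("" ++ "■") ≤ ns by have e : PySem.Str.len ("" ++ "■") = 1 := (by decide); omega)]
    rw [if_pos (show PySem.Str.len ("" ++ "■" ++ "■") ≤ ns by have e : PySem.Str.len ("" ++ "■" ++ "■") = 2 := (by decide); omega)]
    rw [if_pos (show PySem.Str.len ("" ++ "■" ++ "■" ++ "■") ≤ ns by have e : PySem.Str.len ("" ++ "■" ++ "■" ++ "■") = 3 := (by decide); omega)]
    rw [if_pos (show PySem.Str.len ("" ++ "■" ++ "■" ++ "■" ++ "■") ≤ ns by have e : PySem.Str.len ("" ++ "■" ++ "■" ++ "■" ++ "■") = 4 := (by decide); omega)]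
    have e1 : (5 - max 0 (min 5 (ns + 1))).toNat = 0 := by omega
    have e2 : (max 0 (min 5 (ns + 1))).toNat = 5 := by omega
    rw [e1, e2]
    decide
  · by_cases h0 : ns < 0
    · rw [if_neg (show ¬PySem.Str.len "" ≤ ns by have e : PySem.Str.len "" = 0 := (by decide); omega)]
      rw [if_neg (show ¬PySem.Str.len ("" ++ "□") ≤ ns by have e : PySem.Str.len ("" ++ "□") = 1 := (by decide); omega)]
      rw [if_neg (show ¬PySem.Str.len ("" ++ "□" ++ "□") ≤ ns by have e : PySem.Str.len ("" ++ "□" ++ "□") = 2 := (by decide); omega)]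
      rw [if_neg (show ¬PySem.Str.len ("" ++ "□" ++ "□" ++ "□") ≤ ns by have e : PySem.Str.len ("" ++ "□" ++ "□" ++ "□") = 3 := (by decide); omega)]
      rw [if_neg (show ¬PySem.Str.len ("" ++ "□" ++ "□" ++ "□" ++ "□") ≤ ns by have e : PySem.Str.len ("" ++ "□" ++ "□" ++ "□" ++ "□") = 4 := (by decide); omega)]
      have e1 : (5 - max 0 (min 5 (ns + 1))).toNat = 5 := by omega
      have e2 : (max 0 (min 5 (ns + 1))).toNat = 0 := by omega
      rw [e1, e2]
      decide
    · interval_cases ns <;> decide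

-- ===== VERDICT (by name: the statement is the Claim_ definition above) =====
theorem powerBar_spec : Claim_equal_powerBar := by
  intro power _
  show powerBar power = powerBar_alt power
  simp only [powerBar, powerBar_alt]
  exact bar_key _
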